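-- pv_equiv track=rewrite | github.com/DeliXi199/ai-novel-platform | backend/app/services/preparation_diagnostics.py | _pipeline_totals
-- ===== SOURCE A (Python) =====
-- from typing import Any
--
-- def _safe_int(value: Any, default: int = 0) -> int:
--     try:
--         return int(value or 0)
--     except Exception:
--         return default
--
-- def _sum_ints(values: list[int]) -> int:
--     return sum(_safe_int(item) for item in values)
--
-- def _pipeline_totals(selectors: dict[str, dict[str, Any]]) -> dict[str, int]:
--     prompt_chars = _sum_ints([item.get("prompt_chars") for item in selectors.values()])
--     timeout_seconds = _sum_ints([item.get("timeout_seconds") for item in selectors.values()])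
--     llm_calls = _sum_ints([item.get("llm_calls") for item in selectors.values()])
--     duration_ms = _sum_ints([item.get("duration_ms") for item in selectors.values()])
--     waited_ms = _sum_ints([item.get("waited_ms") for item in selectors.values()])
--     response_chars = _sum_ints([item.get("response_chars") for item in selectors.values()])
--     return {
--         "selector_count": len(selectors),
--         "prompt_chars": prompt_chars,
--         "timeout_seconds": timeout_seconds,
--         "llm_calls": llm_calls,
--         "duration_ms": duration_ms,
--         "waited_ms": waited_ms,
--         "response_chars": response_chars,
--     }
-- ===== SOURCE B (Python) =====
-- from typing import Any
--
-- def _safe_int(value: Any, default: int = 0) -> int: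
--     try:
--         return int(value or 0)
--     except Exception:
--         return default
--
-- _FIELDS = ("prompt_chars", "timeout_seconds", "llm_calls",
--            "duration_ms", "waited_ms", "response_chars")
--
-- def _pipeline_totals(selectors: dict[str, dict[str, Any]]) -> dict[str, int]:
--     # One pass over the selectors, six accumulators maintained together.
--     totals = {field: 0 for field in _FIELDS}
--     for item in selectors.values():
--         for field in _FIELDS:
--             totals[field] += _safe_int(item.get(field))
--     return {"selector_count": len(selectors), **totals}
-- ===== Notes on version B (the rewrite author's own statement) =====
-- stated objective: alternative
-- what changed: Replaces A's six separate scans of selectors.values() (one per field, each building an intermediate list and summing it) with a single pass over the selectors that maintains six accumulators updated together.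
import Mathlib
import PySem

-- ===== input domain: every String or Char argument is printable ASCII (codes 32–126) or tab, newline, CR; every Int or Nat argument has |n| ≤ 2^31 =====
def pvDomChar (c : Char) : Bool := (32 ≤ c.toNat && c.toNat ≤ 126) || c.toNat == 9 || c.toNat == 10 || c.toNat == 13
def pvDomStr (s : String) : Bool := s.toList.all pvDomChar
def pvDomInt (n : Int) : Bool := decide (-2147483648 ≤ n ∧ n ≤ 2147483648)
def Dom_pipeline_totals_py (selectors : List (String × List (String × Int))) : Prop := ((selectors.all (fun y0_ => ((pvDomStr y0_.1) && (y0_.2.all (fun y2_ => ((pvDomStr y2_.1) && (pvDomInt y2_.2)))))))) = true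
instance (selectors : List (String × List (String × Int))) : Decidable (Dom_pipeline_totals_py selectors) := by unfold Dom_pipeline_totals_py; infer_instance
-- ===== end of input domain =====

-- B replaces A's six separate scans over selectors.values() by one pass keeping six accumulators (objective: alternative decomposition; one list traversal instead of six).
-- ===== PORT A =====
-- _safe_int on an Option Int (item.get): int(v or 0) is v for an int, 0 for None — exact on this domain.
def safe_int_py (value : Option Int) : Int :=
  match value with
  | none => 0
  | some v => v

-- _sum_ints
def sum_ints_py (values : List (Option Int)) : Int :=
  (values.map safe_int_py).sum

def pipeline_totals_py (selectors : List (String × List (String × Int))) : List (String × Int) :=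
  let prompt_chars := sum_ints_py (selectors.map (fun kv => kv.2.lookup "prompt_chars"))
  let timeout_seconds := sum_ints_py (selectors.map (fun kv => kv.2.lookup "timeout_seconds"))
  let llm_calls := sum_ints_py (selectors.map (fun kv => kv.2.lookup "llm_calls"))
  let duration_ms := sum_ints_py (selectors.map (fun kv => kv.2.lookup "duration_ms"))
  let waited_ms := sum_ints_py (selectors.map (fun kv => kv.2.lookup "waited_ms"))
  let response_chars := sum_ints_py (selectors.map (fun kv => kv.2.lookup "response_chars"))
  [("selector_count", (selectors.length : Int)),
   ("prompt_chars", prompt_chars),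
   ("timeout_seconds", timeout_seconds),
   ("llm_calls", llm_calls),
   ("duration_ms", duration_ms),
   ("waited_ms", waited_ms),
   ("response_chars", response_chars)]

-- ===== PORT B =====
-- _safe_int(item.get(field)) in B: first-match lookup, 0 when absent.
def field_val_alt (item : List (String × Int)) (field : String) : Int :=
  match item.lookup field with
  | none => 0
  | some v => v

-- the single pass with six accumulators
def step_alt (acc : Int × Int × Int × Int × Int × Int) (kv : String × List (String × Int)) :
    Int × Int × Int × Int × Int × Int :=
  let item := kv.2
  (acc.1 + field_val_alt item "prompt_chars",
   acc.2.1 + field_val_alt item "timeout_seconds",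
   acc.2.2.1 + field_val_alt item "llm_calls",
   acc.2.2.2.1 + field_val_alt item "duration_ms",
   acc.2.2.2.2.1 + field_val_alt item "waited_ms",
   acc.2.2.2.2.2 + field_val_alt item "response_chars")

def pipeline_totals_py_alt (selectors : List (String × List (String × Int))) : List (String × Int) :=
  let t := selectors.foldl step_alt (0, 0, 0, 0, 0, 0)
  [("selector_count", (selectors.length : Int)),
   ("prompt_chars", t.1),
   ("timeout_seconds", t.2.1),
   ("llm_calls", t.2.2.1),
   ("duration_ms", t.2.2.2.1),
   ("waited_ms", t.2.2.2.2.1),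
   ("response_chars", t.2.2.2.2.2)]

-- ===== PRECONDITION & SPEC =====
def Spec_pipeline_totals_py (selectors : List (String × List (String × Int))) (out : List (String × Int)) : Prop := out = pipeline_totals_py_alt selectors
instance (selectors : List (String × List (String × Int))) (out : List (String × Int)) : Decidable (Spec_pipeline_totals_py selectors out) := by unfold Spec_pipeline_totals_py; infer_instance

-- ===== CLAIM (what is proved, stated in full; the proofs are below) =====
def Claim_equal_pipeline_totals_py : Prop := ∀ (selectors : List (String × List (String × Int))), Dom_pipeline_totals_py selectors → Spec_pipeline_totals_py selectors (pipeline_totals_py selectors)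

-- ===== LEMMAS AND PROOFS =====
-- the per-selector contribution A sums and B accumulates coincide
theorem safe_int_eq_field_val (item : List (String × Int)) (f : String) :
    safe_int_py (item.lookup f) = field_val_alt item f := by
  cases h : item.lookup f <;> simp [safe_int_py, field_val_alt, h]

-- loop invariant: the fold equals the six sums, shifted by the accumulator
theorem foldl_step_alt (l : List (String × List (String × Int)))
    (a b c d e g : Int) :
    l.foldl step_alt (a, b, c, d, e, g) =
      (a + sum_ints_py (l.map (fun kv => kv.2.lookup "prompt_chars")),
       b + sum_ints_py (l.map (fun kv => kv.2.lookup "timeout_seconds")),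
       c + sum_ints_py (l.map (fun kv => kv.2.lookup "llm_calls")),
       d + sum_ints_py (l.map (fun kv => kv.2.lookup "duration_ms")),
       e + sum_ints_py (l.map (fun kv => kv.2.lookup "waited_ms")),
       g + sum_ints_py (l.map (fun kv => kv.2.lookup "response_chars"))) := by
  induction l generalizing a b c d e g with
  | nil => simp [sum_ints_py]
  | cons hd tl ih =>
      simp only [List.foldl_cons, ih, step_alt, sum_ints_py, List.map_cons, List.sum_cons,
        safe_int_eq_field_val]
      refine Prod.ext ?_ (Prod.ext ?_ (Prod.ext ?_ (Prod.ext ?_ (Prod.ext ?_ ?_)))) <;> simp <;> try ring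

-- ===== VERDICT (by name: the statement is the Claim_ definition above) =====
theorem pipeline_totals_py_spec : Claim_equal_pipeline_totals_py := by
  intro selectors _
  unfold Spec_pipeline_totals_py pipeline_totals_py pipeline_totals_py_alt
  rw [foldl_step_alt]
  simp
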